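-- pv_equiv track=rewrite | github.com/AhmedKhaled146/hill-cipher | hill_cipher.py | convert_string_to_matrix
-- ===== SOURCE A (Python) =====
-- LETTERS_INTEGERS = dict(zip("ABCDEFGHIJKLMNOPQRSTUVWXYZabcdefghijklmnopqrstuvwxyz", [*range(26)] + [*range(26)]))
--
-- def convert_string_to_matrix(text, n):
--     keyMatrix = [[0] * n for i in range(n)]
--     k = 0
--     for i in range(n):
--         for j in range(n):
--             keyMatrix[i][j] = LETTERS_INTEGERS[text[k]] % 65
--             k += 1
--     return keyMatrix
-- ===== SOURCE B (Python) =====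
-- def convert_string_to_matrix(text, n):
--     if n <= 0:
--         return []
--     flat = [ord(text[k].lower()) - 97 for k in range(n * n)]
--     return [flat[i * n:(i + 1) * n] for i in range(n)]
-- ===== Notes on version B (the rewrite author's own statement) =====
-- stated objective: alternative
-- what changed: Replaces A's dict lookup inside a counter-driven nested write loop by arithmetic case-folding (ord(c.lower()) - 97) computed in one flat pass, which is then chunked into rows by slicing; no letter table and no mutation.
import Mathlib
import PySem

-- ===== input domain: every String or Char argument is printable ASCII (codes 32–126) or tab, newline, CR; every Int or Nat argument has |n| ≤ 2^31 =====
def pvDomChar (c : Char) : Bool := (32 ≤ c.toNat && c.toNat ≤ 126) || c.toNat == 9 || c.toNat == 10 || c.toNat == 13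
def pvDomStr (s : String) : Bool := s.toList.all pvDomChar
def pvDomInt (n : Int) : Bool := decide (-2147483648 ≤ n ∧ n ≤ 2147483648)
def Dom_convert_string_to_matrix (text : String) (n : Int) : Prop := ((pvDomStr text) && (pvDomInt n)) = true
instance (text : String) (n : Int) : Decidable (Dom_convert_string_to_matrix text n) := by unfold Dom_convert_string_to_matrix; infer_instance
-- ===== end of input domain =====

-- B drops A's letter table and mutation entirely: it case-folds arithmetically
-- (ord(c.lower()) - 97) in one flat pass and chunks the flat list into rows by slicing
-- (objective: alternative — same cost, different algorithm).

-- module constant LETTERS_INTEGERS (context of program A)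
def pvLetters : PySem.Dict Char Int :=
  PySem.Dict.ofList
    (("ABCDEFGHIJKLMNOPQRSTUVWXYZabcdefghijklmnopqrstuvwxyz".toList).zip
      (((List.range 26).map (Int.ofNat)) ++ ((List.range 26).map (Int.ofNat))))

-- ===== PORT A =====
def convert_string_to_matrix (text : String) (n : Int) : List (List Int) :=
  let keyMatrix : List (List Int) :=
    (PySem.List.pyRange 0 n 1).map (fun _ => List.replicate n.toNat (0 : Int))
  let st :=
    (PySem.List.pyRange 0 n 1).foldl (fun (st : List (List Int) × Int) i =>
      (PySem.List.pyRange 0 n 1).foldl (fun (st : List (List Int) × Int) _j =>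
        let v := PySem.Int.mod
          ((pvLetters.get? ((PySem.Str.pyGet? text st.2).getD ' ')).getD 0) 65
        (PySem.List.pySetD st.1 i
          (PySem.List.pySetD (PySem.List.pyGetD st.1 i []) _j v), st.2 + 1)) st)
      (keyMatrix, (0 : Int))
  st.1

-- ===== PORT B =====
-- text[k].lower() on a single char: exact on the ASCII domain (one char in, one char out)
def pvLower1 (c : Char) : Char := (PySem.Chars.lower [c]).headD c

def convert_string_to_matrix_alt (text : String) (n : Int) : List (List Int) :=
  if n ≤ 0 then []
  else
    let flat : List Int :=
      (PySem.List.pyRange 0 (n * n) 1).map (fun k =>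
        ((pvLower1 ((PySem.Str.pyGet? text k).getD ' ')).toNat : Int) - 97)  -- ord(..) is the codepoint
    (PySem.List.pyRange 0 n 1).map (fun i =>
      PySem.List.slice flat (some (i * n)) (some ((i + 1) * n)))

-- ===== PRECONDITION & SPEC =====
-- Pre_ excludes exactly the inputs where A raises: for n > 0, a text shorter than n*n
-- characters (IndexError) or one whose first n*n characters are not all ASCII letters (KeyError).
def Pre_convert_string_to_matrix (text : String) (n : Int) : Prop :=
  n ≤ 0 ∨ (n * n ≤ (text.toList.length : Int) ∧
    (text.toList.take (n * n).toNat).all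
      (fun c => ("ABCDEFGHIJKLMNOPQRSTUVWXYZabcdefghijklmnopqrstuvwxyz".toList).contains c) = true)
instance (text : String) (n : Int) : Decidable (Pre_convert_string_to_matrix text n) := by
  unfold Pre_convert_string_to_matrix; infer_instance

def pvWitness_convert_string_to_matrix : String × Int := ("AbCd", 2)

def Spec_convert_string_to_matrix (text : String) (n : Int) (out : List (List Int)) : Prop := out = convert_string_to_matrix_alt text n
instance (text : String) (n : Int) (out : List (List Int)) : Decidable (Spec_convert_string_to_matrix text n out) := by unfold Spec_convert_string_to_matrix; infer_instance

-- ===== CLAIM (what is proved, stated in full; the proofs are below) =====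
def Claim_equal_convert_string_to_matrix : Prop := ∀ (text : String) (n : Int), Dom_convert_string_to_matrix text n → Pre_convert_string_to_matrix text n → Spec_convert_string_to_matrix text n (convert_string_to_matrix text n)

-- ===== LEMMAS AND PROOFS =====

-- take of range' (helper for the slice computation)
lemma pv_take_range' (s n m : Nat) (h : m ≤ n) : (List.range' s n).take m = List.range' s m := by
  induction m generalizing s n with
  | zero => simp
  | succ m ih =>
    cases n with
    | zero => omega
    | succ n =>
      rw [List.range'_succ, List.take_succ_cons, ih (s+1) n (by omega)]
      simp [List.range'_succ]

-- the per-cell value A computes at flat index k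
def pvCell (text : String) (k : Int) : Int :=
  PySem.Int.mod ((pvLetters.get? ((PySem.Str.pyGet? text k).getD ' ')).getD 0) 65

-- the per-cell value B computes at flat index k
def pvCellB (text : String) (k : Int) : Int :=
  ((pvLower1 ((PySem.Str.pyGet? text k).getD ' ')).toNat : Int) - 97

-- on every ASCII letter the two per-char computations agree (checked by evaluation)
set_option maxRecDepth 100000 in
lemma pv_letters_ok :
    ("ABCDEFGHIJKLMNOPQRSTUVWXYZabcdefghijklmnopqrstuvwxyz".toList).all
      (fun c => PySem.Int.mod ((pvLetters.get? c).getD 0) 65 ==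
        ((pvLower1 c).toNat : Int) - 97) = true := by decide

lemma pv_cell_eq (text : String) (k : Nat)
    (hk : k < text.toList.length)
    (hc : ("ABCDEFGHIJKLMNOPQRSTUVWXYZabcdefghijklmnopqrstuvwxyz".toList).contains
      (text.toList[k]'hk) = true) :
    pvCell text (k : Int) = pvCellB text (k : Int) := by
  have hm : (text.toList[k]'hk) ∈
      ("ABCDEFGHIJKLMNOPQRSTUVWXYZabcdefghijklmnopqrstuvwxyz".toList) := by
    simpa using hc
  have h := List.all_eq_true.mp pv_letters_ok _ hm
  have hget : PySem.Str.pyGet? text (k : Int) = some (text.toList[k]'hk) := by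
    simp only [PySem.Str.pyGet?, PySem.Chars.pyGet?]
    rw [PySem.List.pyGet?_eq_some_getElem _ (Int.natCast_nonneg k) (by exact_mod_cast hk)]
    simp
  simp only [pvCell, pvCellB, hget, Option.getD_some]
  exact_mod_cast of_decide_eq_true h

-- A's inner loop: writes g k, g (k+1), … into row i, advancing the counter
lemma pv_inner_fold (g : Int → Int) (M : Nat) (m : List (List Int)) (i : Nat)
    (hi : i < m.length) (hM : M ≤ m[i].length) (k : Int) :
    (PySem.List.pyRange 0 (M : Int) 1).foldl
      (fun (st : List (List Int) × Int) j =>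
        (PySem.List.pySetD st.1 (i : Int)
          (PySem.List.pySetD (PySem.List.pyGetD st.1 (i : Int) []) j (g st.2)), st.2 + 1))
      (m, k)
    = (m.set i (((List.range M).map (fun j : Nat => g (k + (j : Int)))) ++ m[i].drop M), k + M) := by
  induction M with
  | zero =>
      simp [PySem.List.pyRange_one_eq_nil (le_refl (0:Int)), List.set_getElem_self]
  | succ M ih =>
      have hM' : M < m[i].length := Nat.lt_of_lt_of_le (Nat.lt_succ_self M) hM
      have hcast : ((M + 1 : Nat) : Int) = (M : Int) + 1 := by push_cast; ring
      rw [hcast, PySem.List.pyRange_one_succ_right (by positivity), List.foldl_append,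
        ih hM'.le, List.foldl_cons, List.foldl_nil]
      have hlen : i < (m.set i (((List.range M).map (fun j : Nat => g (k + (j : Int)))) ++ m[i].drop M)).length := by
        simpa using hi
      refine Prod.ext ?_ ?_
      · simp only [PySem.List.pySetD_natCast, PySem.List.pyGetD_natCast,
          List.getD_eq_getElem _ _ hlen, List.getElem_set_self, List.set_set]
        rw [List.drop_eq_getElem_cons hM']
        rw [List.set_append]
        simp only [List.length_map, List.length_range, lt_irrefl, if_false, Nat.sub_self,
          List.set_cons_zero]
        rw [List.range_succ, List.map_append]
        simp
      · simp only []
        ring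

-- A's outer loop invariant: after I rows the first I rows are filled and k = I*N
lemma pv_outer_fold (g : Int → Int) (N I : Nat) (hI : I ≤ N) :
    (PySem.List.pyRange 0 (I : Int) 1).foldl
      (fun (st : List (List Int) × Int) i =>
        (PySem.List.pyRange 0 (N : Int) 1).foldl
          (fun (st : List (List Int) × Int) j =>
            (PySem.List.pySetD st.1 i
              (PySem.List.pySetD (PySem.List.pyGetD st.1 i []) j (g st.2)), st.2 + 1)) st)
      (List.replicate N (List.replicate N (0 : Int)), 0)
    = ((List.range I).map (fun i : Nat => (List.range N).map (fun j : Nat => g ((i : Int) * N + (j : Int))))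
        ++ List.replicate (N - I) (List.replicate N (0 : Int)), (I : Int) * N) := by
  induction I with
  | zero =>
      simp [PySem.List.pyRange_one_eq_nil (le_refl (0:Int))]
  | succ I ih =>
      have hI' : I < N := Nat.lt_of_lt_of_le (Nat.lt_succ_self I) hI
      have hcast : ((I + 1 : Nat) : Int) = (I : Int) + 1 := by push_cast; ring
      rw [hcast, PySem.List.pyRange_one_succ_right (by positivity), List.foldl_append,
        ih hI'.le, List.foldl_cons, List.foldl_nil]
      set done := (List.range I).map
        (fun i : Nat => (List.range N).map (fun j : Nat => g ((i : Int) * N + (j : Int)))) with hdone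
      have hdlen : done.length = I := by simp [hdone]
      have hmlen : (done ++ List.replicate (N - I) (List.replicate N (0:Int))).length = N := by
        simp [hdlen]; omega
      have hiN : I < (done ++ List.replicate (N - I) (List.replicate N (0:Int))).length := by
        omega
      have hrow : (done ++ List.replicate (N - I) (List.replicate N (0:Int)))[I]'hiN
          = List.replicate N (0:Int) := by
        rw [List.getElem_append_right (by omega)]
        simp
      have h := pv_inner_fold g N (done ++ List.replicate (N - I) (List.replicate N (0:Int)))
        I hiN (by rw [hrow]; simp) ((I : Int) * N)
      rw [h]
      refine Prod.ext ?_ ?_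
      · simp only [hrow, List.drop_replicate, Nat.sub_self, List.replicate_zero, List.append_nil]
        have hrep : List.replicate (N - I) (List.replicate N (0:Int))
            = List.replicate N (0:Int) :: List.replicate (N - (I + 1)) (List.replicate N (0:Int)) := by
          have : N - I = (N - (I + 1)) + 1 := by omega
          rw [this, List.replicate_succ]
        rw [hrep, List.set_append]
        simp only [hdlen, lt_irrefl, if_false, Nat.sub_self, List.set_cons_zero]
        rw [List.range_succ, List.map_append]
        simp [hdone]
      · simp only []
        ring

lemma pv_A_closed (text : String) (N : Nat) :
    convert_string_to_matrix text (N : Int)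
    = (List.range N).map (fun i : Nat => (List.range N).map (fun j : Nat => pvCell text ((i : Int) * N + (j : Int)))) := by
  have h := pv_outer_fold (pvCell text) N N le_rfl
  simp only [pvCell] at h
  simp only [convert_string_to_matrix]
  rw [List.map_const', PySem.List.length_pyRange_one]
  simp only [Int.sub_zero, Int.toNat_natCast]
  rw [h]
  simp [pvCell, PySem.Int.mod, PySem.Str.pyGet?]

lemma pv_B_closed (text : String) (N : Nat) (hN : 0 < N) :
    convert_string_to_matrix_alt text (N : Int)
    = (List.range N).map (fun i : Nat => (List.range N).map (fun j : Nat => pvCellB text (((i * N + j : Nat)) : Int))) := by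
  simp only [convert_string_to_matrix_alt, if_neg (by exact_mod_cast Nat.not_le.mpr hN : ¬ ((N:Int) ≤ 0))]
  have hNN : (N : Int) * N = ((N * N : Nat) : Int) := by push_cast; ring
  rw [hNN, PySem.List.pyRange_one 0 ((N * N : Nat) : Int)]
  rw [PySem.List.pyRange_one 0 (N : Int)]
  simp only [Int.sub_zero, Int.toNat_natCast, List.map_map]
  apply List.map_congr_left
  intro i hi
  have hi' : i < N := List.mem_range.mp hi
  simp only [Function.comp_apply, zero_add]
  have hstart : ((i : Int) * N) = (((i * N : Nat)) : Int) := by push_cast; ring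
  have hstop : ((i : Int) + 1) * N = (((i * N : Nat)) : Int) + ((N : Nat) : Int) := by push_cast; ring
  rw [hstart, hstop, PySem.List.slice_natCast_add]
  rw [← List.map_drop, ← List.map_take, List.range_eq_range', List.drop_range']
  have htake : (List.range' (0 + i * N * 1) (N * N - i * N)).take N = List.range' (i * N) N := by
    have hle : N ≤ N * N - i * N := by
      have h1 : (i + 1) * N ≤ N * N := Nat.mul_le_mul_right N hi'
      rw [Nat.add_mul, Nat.one_mul] at h1
      omega
    simpa using pv_take_range' (i * N) (N * N - i * N) N hle
  rw [htake, List.range'_eq_map_range, List.map_map]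
  apply List.map_congr_left
  intro j hj
  simp [pvCellB]

-- extract the letter fact for index k from Pre_'s take/all condition
lemma pv_pre_char (text : String) (M : Nat) (k : Nat)
    (hlen : M ≤ text.toList.length) (hk : k < M)
    (hall : (text.toList.take M).all
      (fun c => ("ABCDEFGHIJKLMNOPQRSTUVWXYZabcdefghijklmnopqrstuvwxyz".toList).contains c) = true) :
    ("ABCDEFGHIJKLMNOPQRSTUVWXYZabcdefghijklmnopqrstuvwxyz".toList).contains
      (text.toList[k]'(Nat.lt_of_lt_of_le hk hlen)) = true := by
  have hk' : k < (text.toList.take M).length := by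
    rw [List.length_take]; omega
  have := List.all_eq_true.mp hall ((text.toList.take M)[k]'hk') (List.getElem_mem hk')
  simpa [List.getElem_take] using this

-- ===== VERDICT (by name: the statement is the Claim_ definition above) =====
theorem convert_string_to_matrix_spec : Claim_equal_convert_string_to_matrix := by
  intro text n _ hpre
  unfold Spec_convert_string_to_matrix
  by_cases hn : n ≤ 0
  · simp [convert_string_to_matrix, convert_string_to_matrix_alt,
      PySem.List.pyRange_one_eq_nil hn]
  · obtain ⟨N, rfl⟩ : ∃ N : Nat, n = (N : Int) :=
      ⟨n.toNat, (Int.toNat_of_nonneg ((lt_of_not_ge hn).le)).symm⟩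
    have hN : 0 < N := by exact_mod_cast lt_of_not_ge hn
    rcases hpre with h | ⟨hlen, hall⟩
    · exact absurd h hn
    have hNN : (N : Int) * N = ((N * N : Nat) : Int) := by push_cast; ring
    rw [hNN] at hlen hall
    have hlen' : N * N ≤ text.toList.length := by exact_mod_cast hlen
    rw [Int.toNat_natCast] at hall
    rw [pv_A_closed, pv_B_closed text N hN]
    apply List.map_congr_left
    intro i hi
    apply List.map_congr_left
    intro j hj
    have hi' : i < N := List.mem_range.mp hi
    have hj' : j < N := List.mem_range.mp hj
    have hk : i * N + j < N * N := by
      calc i * N + j < i * N + N := by omega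
        _ = (i + 1) * N := by ring
        _ ≤ N * N := Nat.mul_le_mul_right N hi'
    have hcast : (i : Int) * N + (j : Int) = (((i * N + j : Nat)) : Int) := by push_cast; ring
    rw [hcast]
    exact pv_cell_eq text (i * N + j) (Nat.lt_of_lt_of_le hk hlen')
      (pv_pre_char text (N * N) (i * N + j) hlen' hk hall)
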